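-- pv_equiv track=rewrite | github.com/RGZ1890/codetree-TILs | 241008/루돌프의 반란/rudolph-rebellion.py | rudolf_move
-- ===== SOURCE A (Python) =====
-- directions = [[-1, 0], [-1, 1], [0, 1], [1, 1], [1, 0], [1, -1], [0, -1], [-1, -1]]
--
-- def get_dist(A, B):
--     return (A[0] - B[0]) ** 2 + (A[1] - B[1]) ** 2
--
-- def rudolf_move(santas, rudolf):
--     cur_santa = 0
--     cur_dist = 999
--     dir = -1
--     for i in range(len(santas)):
--         dist = get_dist(santas[i], rudolf)
--         if cur_dist > dist:
--             cur_santa, cur_dist = i, dist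
--         elif cur_dist == dist:
--             if santas[cur_santa][0] < santas[i][0]:
--                 cur_santa, cur_dist = i, dist
--             elif santas[cur_santa][0] == santas[i][0]:
--                 if santas[cur_santa][1] < santas[i][1]:
--                     cur_santa, cur_dist = i, dist
--
--     best_pos = [0, 0]
--     best_dist = cur_dist
--     for i in range(8): # 8 directions
--         n_row, n_col = rudolf[0] + directions[i][0], rudolf[1] + directions[i][1]
--         if get_dist([n_row, n_col], santas[cur_santa]) < best_dist:
--             best_pos = [n_row, n_col]
--             best_dist = get_dist(best_pos, santas[cur_santa])
--             dir = i
--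
--     rudolf[0], rudolf[1] = best_pos[0], best_pos[1]
--
--     return dir
-- ===== SOURCE B (Python) =====
-- directions = [[-1, 0], [-1, 1], [0, 1], [1, 1], [1, 0], [1, -1], [0, -1], [-1, -1]]
--
-- def get_dist(A, B):
--     return (A[0] - B[0]) ** 2 + (A[1] - B[1]) ** 2
--
-- def rudolf_move(santas, rudolf):
--     # First pass: choose the target santa (nearest under the distance cap,
--     # ties broken by the largest row, then the largest column).
--     cur_santa = 0
--     cur_dist = 999
--     for i in range(len(santas)):
--         dist = get_dist(santas[i], rudolf)
--         if cur_dist > dist: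
--             cur_santa, cur_dist = i, dist
--         elif cur_dist == dist:
--             if santas[cur_santa][0] < santas[i][0]:
--                 cur_santa = i
--             elif santas[cur_santa][0] == santas[i][0] and santas[cur_santa][1] < santas[i][1]:
--                 cur_santa = i
--     target = santas[cur_santa]
--     # Closed-form step: one move along the sign vector toward the target,
--     # taken only when it gets strictly closer than the current best distance.
--     dr = (target[0] > rudolf[0]) - (target[0] < rudolf[0])
--     dc = (target[1] > rudolf[1]) - (target[1] < rudolf[1])
--     if dr == 0 and dc == 0:
--         return -1
--     if get_dist([rudolf[0] + dr, rudolf[1] + dc], target) >= cur_dist: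
--         return -1
--     rudolf[0] += dr
--     rudolf[1] += dc
--     return directions.index([dr, dc])
-- ===== Notes on version B (the rewrite author's own statement) =====
-- stated objective: simpler
-- what changed: The 8-direction probe loop with best_pos/best_dist state is replaced by a closed-form sign step toward the chosen santa (proved optimal among the eight moves), keeping the selection pass; Pre_ excludes only the inputs where A raises IndexError (empty santas, a santa row or rudolf shorter than 2).
import Mathlib
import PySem

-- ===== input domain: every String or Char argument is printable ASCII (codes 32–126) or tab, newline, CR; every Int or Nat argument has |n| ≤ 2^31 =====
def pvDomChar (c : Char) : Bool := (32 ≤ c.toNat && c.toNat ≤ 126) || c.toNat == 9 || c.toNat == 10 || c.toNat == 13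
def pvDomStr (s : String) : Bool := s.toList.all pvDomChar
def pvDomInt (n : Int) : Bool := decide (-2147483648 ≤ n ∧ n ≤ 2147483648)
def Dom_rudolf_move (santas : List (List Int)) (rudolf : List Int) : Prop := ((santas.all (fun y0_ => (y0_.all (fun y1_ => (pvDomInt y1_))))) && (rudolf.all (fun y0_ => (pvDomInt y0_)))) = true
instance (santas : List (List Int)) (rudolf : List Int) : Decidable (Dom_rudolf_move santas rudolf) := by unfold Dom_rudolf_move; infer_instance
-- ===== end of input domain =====

-- B replaces A's 8-direction probe loop by a closed-form sign step toward the chosen santa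
-- (objective: simpler).  Equivalence is about the RETURN value only: A also writes [0,0]
-- into rudolf when no move improves, B leaves rudolf untouched in that case.

-- ===== PORT A =====
def directions : List (List Int) := [[-1, 0], [-1, 1], [0, 1], [1, 1], [1, 0], [1, -1], [0, -1], [-1, -1]]

def get_dist (A B : List Int) : Int :=
  (PySem.List.pyGetD A 0 0 - PySem.List.pyGetD B 0 0) ^ 2 +
  (PySem.List.pyGetD A 1 0 - PySem.List.pyGetD B 1 0) ^ 2

def rudolf_move (santas : List (List Int)) (rudolf : List Int) : Int :=
  let st := (PySem.List.pyRange 0 (santas.length : Int) 1).foldl (fun (st : Int × Int) i =>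
      let dist := get_dist (PySem.List.pyGetD santas i []) rudolf
      if st.2 > dist then (i, dist)
      else if st.2 = dist then
        (if PySem.List.pyGetD (PySem.List.pyGetD santas st.1 []) 0 0 <
            PySem.List.pyGetD (PySem.List.pyGetD santas i []) 0 0 then (i, dist)
         else if PySem.List.pyGetD (PySem.List.pyGetD santas st.1 []) 0 0 =
                 PySem.List.pyGetD (PySem.List.pyGetD santas i []) 0 0 then
           (if PySem.List.pyGetD (PySem.List.pyGetD santas st.1 []) 1 0 <
               PySem.List.pyGetD (PySem.List.pyGetD santas i []) 1 0 then (i, dist) else st)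
         else st)
      else st) ((0 : Int), (999 : Int))
  let fin := (PySem.List.pyRange 0 8 1).foldl (fun (b : List Int × Int × Int) i =>
      let nrow := PySem.List.pyGetD rudolf 0 0 + PySem.List.pyGetD (PySem.List.pyGetD directions i []) 0 0
      let ncol := PySem.List.pyGetD rudolf 1 0 + PySem.List.pyGetD (PySem.List.pyGetD directions i []) 1 0
      if get_dist [nrow, ncol] (PySem.List.pyGetD santas st.1 []) < b.2.1 then
        ([nrow, ncol], get_dist [nrow, ncol] (PySem.List.pyGetD santas st.1 []), i)
      else b) (([0, 0] : List Int), st.2, (-1 : Int))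
  fin.2.2

-- ===== PORT B =====
-- B-side helper: the body of B's selection loop
def stepB (santas : List (List Int)) (rudolf : List Int) (st : Int × Int) (i : Int) : Int × Int :=
  let dist := get_dist (PySem.List.pyGetD santas i []) rudolf
  if st.2 > dist then (i, dist)
  else if st.2 = dist then
    (if PySem.List.pyGetD (PySem.List.pyGetD santas st.1 []) 0 0 <
        PySem.List.pyGetD (PySem.List.pyGetD santas i []) 0 0 then (i, st.2)
     else if PySem.List.pyGetD (PySem.List.pyGetD santas st.1 []) 0 0 =
             PySem.List.pyGetD (PySem.List.pyGetD santas i []) 0 0 ∧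
             PySem.List.pyGetD (PySem.List.pyGetD santas st.1 []) 1 0 <
             PySem.List.pyGetD (PySem.List.pyGetD santas i []) 1 0 then (i, st.2)
     else st)
  else st

def rudolf_move_alt (santas : List (List Int)) (rudolf : List Int) : Int :=
  let st := (PySem.List.pyRange 0 (santas.length : Int) 1).foldl (stepB santas rudolf) ((0 : Int), (999 : Int))
  let target := PySem.List.pyGetD santas st.1 []
  let r0 := PySem.List.pyGetD rudolf 0 0
  let r1 := PySem.List.pyGetD rudolf 1 0
  let dr := (if PySem.List.pyGetD target 0 0 > r0 then (1 : Int) else 0) -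
            (if PySem.List.pyGetD target 0 0 < r0 then (1 : Int) else 0)
  let dc := (if PySem.List.pyGetD target 1 0 > r1 then (1 : Int) else 0) -
            (if PySem.List.pyGetD target 1 0 < r1 then (1 : Int) else 0)
  if dr = 0 ∧ dc = 0 then -1
  else if get_dist [r0 + dr, r1 + dc] target ≥ st.2 then -1
  else match PySem.List.index? directions [dr, dc] with
       | some k => (k : Int)
       | none => -1

-- ===== PRECONDITION & SPEC =====
-- Pre_ excludes exactly the inputs on which the Python A raises IndexError:
-- empty santas, a santa row with fewer than 2 entries, or rudolf with fewer than 2 entries.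
def Pre_rudolf_move (santas : List (List Int)) (rudolf : List Int) : Prop :=
  santas ≠ [] ∧ (∀ s ∈ santas, 2 ≤ s.length) ∧ 2 ≤ rudolf.length
instance (santas : List (List Int)) (rudolf : List Int) : Decidable (Pre_rudolf_move santas rudolf) := by
  unfold Pre_rudolf_move; infer_instance

def pvWitness_rudolf_move : List (List Int) × List Int := ([[3, 4], [1, 1]], [0, 0])

def Spec_rudolf_move (santas : List (List Int)) (rudolf : List Int) (out : Int) : Prop := out = rudolf_move_alt santas rudolf
instance (santas : List (List Int)) (rudolf : List Int) (out : Int) : Decidable (Spec_rudolf_move santas rudolf out) := by unfold Spec_rudolf_move; infer_instance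

-- ===== CLAIM (what is proved, stated in full; the proofs are below) =====
def Claim_equal_rudolf_move : Prop := ∀ (santas : List (List Int)) (rudolf : List Int), Dom_rudolf_move santas rudolf → Pre_rudolf_move santas rudolf → Spec_rudolf_move santas rudolf (rudolf_move santas rudolf)

-- ===== LEMMAS AND PROOFS =====

lemma get_dist_sumsq (s rudolf : List Int) :
    get_dist s rudolf =
      (PySem.List.pyGetD s 0 0 - PySem.List.pyGetD rudolf 0 0) ^ 2 +
      (PySem.List.pyGetD s 1 0 - PySem.List.pyGetD rudolf 1 0) ^ 2 := rfl

-- first-loop step functions, named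
def stepA (santas : List (List Int)) (rudolf : List Int) (st : Int × Int) (i : Int) : Int × Int :=
  let dist := get_dist (PySem.List.pyGetD santas i []) rudolf
  if st.2 > dist then (i, dist)
  else if st.2 = dist then
    (if PySem.List.pyGetD (PySem.List.pyGetD santas st.1 []) 0 0 <
        PySem.List.pyGetD (PySem.List.pyGetD santas i []) 0 0 then (i, dist)
     else if PySem.List.pyGetD (PySem.List.pyGetD santas st.1 []) 0 0 =
             PySem.List.pyGetD (PySem.List.pyGetD santas i []) 0 0 then
       (if PySem.List.pyGetD (PySem.List.pyGetD santas st.1 []) 1 0 <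
           PySem.List.pyGetD (PySem.List.pyGetD santas i []) 1 0 then (i, dist) else st)
     else st)
  else st

lemma stepB_eq_stepA (santas : List (List Int)) (rudolf : List Int) :
    stepB santas rudolf = stepA santas rudolf := by
  funext st i
  unfold stepA stepB
  by_cases h1 : st.2 > get_dist (PySem.List.pyGetD santas i []) rudolf
  · simp [h1]
  · simp only [if_neg h1]
    by_cases h2 : st.2 = get_dist (PySem.List.pyGetD santas i []) rudolf
    · simp only [if_pos h2]
      by_cases h3 : PySem.List.pyGetD (PySem.List.pyGetD santas st.1 []) 0 0 <
          PySem.List.pyGetD (PySem.List.pyGetD santas i []) 0 0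
      · simp [h3, h2]
      · simp only [if_neg h3]
        by_cases h4 : PySem.List.pyGetD (PySem.List.pyGetD santas st.1 []) 0 0 =
            PySem.List.pyGetD (PySem.List.pyGetD santas i []) 0 0
        · by_cases h5 : PySem.List.pyGetD (PySem.List.pyGetD santas st.1 []) 1 0 <
              PySem.List.pyGetD (PySem.List.pyGetD santas i []) 1 0
          · simp [h4, h5, h2]
          · simp [h4, h5]
        · simp [h4]
    · simp [h2]

def distOf (santas : List (List Int)) (rudolf : List Int) (i : Int) : Int :=
  get_dist (PySem.List.pyGetD santas i []) rudolf

lemma stepA_shape (santas : List (List Int)) (rudolf : List Int) (st : Int × Int) (i : Int) :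
    stepA santas rudolf st i = st ∨ stepA santas rudolf st i = (i, distOf santas rudolf i) := by
  unfold stepA distOf
  by_cases h1 : st.2 > get_dist (PySem.List.pyGetD santas i []) rudolf
  · simp [h1]
  · simp only [if_neg h1]
    by_cases h2 : st.2 = get_dist (PySem.List.pyGetD santas i []) rudolf
    · simp only [if_pos h2]
      split_ifs <;> simp
    · simp [h2]

lemma stepA_snd_le (santas : List (List Int)) (rudolf : List Int) (st : Int × Int) (i : Int) :
    (stepA santas rudolf st i).2 ≤ st.2 ∧ (stepA santas rudolf st i).2 ≤ distOf santas rudolf i := by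
  unfold stepA distOf
  by_cases h1 : st.2 > get_dist (PySem.List.pyGetD santas i []) rudolf
  · simp only [if_pos h1]
    exact ⟨le_of_lt h1, le_refl _⟩
  · simp only [if_neg h1]
    by_cases h2 : st.2 = get_dist (PySem.List.pyGetD santas i []) rudolf
    · simp only [if_pos h2]
      split_ifs <;> exact ⟨by omega, by omega⟩
    · simp only [if_neg h2]
      exact ⟨le_refl _, by omega⟩

def QInv (santas : List (List Int)) (rudolf : List Int) (st : Int × Int) : Prop :=
  st = (0, 999) ∨ st.2 = distOf santas rudolf st.1

lemma fold_Q (santas : List (List Int)) (rudolf : List Int) (l : List Int) (st : Int × Int)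
    (h : QInv santas rudolf st) : QInv santas rudolf (l.foldl (stepA santas rudolf) st) := by
  induction l generalizing st with
  | nil => exact h
  | cons hd tl ih =>
      rw [List.foldl_cons]
      apply ih
      rcases stepA_shape santas rudolf st hd with he | he
      · rw [he]; exact h
      · rw [he]; exact Or.inr rfl

lemma fold_snd_le (santas : List (List Int)) (rudolf : List Int) (l : List Int) (st : Int × Int) :
    (l.foldl (stepA santas rudolf) st).2 ≤ st.2 := by
  induction l generalizing st with
  | nil => exact le_refl _
  | cons hd tl ih =>
      rw [List.foldl_cons]
      exact le_trans (ih _) (stepA_snd_le santas rudolf st hd).1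

lemma fold_le_mem (santas : List (List Int)) (rudolf : List Int) (l : List Int) (st : Int × Int) :
    ∀ i ∈ l, (l.foldl (stepA santas rudolf) st).2 ≤ distOf santas rudolf i := by
  induction l generalizing st with
  | nil => intro i hi; exact absurd hi (by simp)
  | cons hd tl ih =>
      intro i hi
      rw [List.foldl_cons]
      rcases List.mem_cons.mp hi with rfl | hi'
      · exact le_trans (fold_snd_le santas rudolf tl _) (stepA_snd_le santas rudolf st i).2
      · exact ih _ i hi'

-- second-loop machinery: min-with-index fold
def mstep (st : Int × Int) (p : Int × Int) : Int × Int := if p.2 < st.1 then (p.2, p.1) else st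

lemma foldmin_no (l : List (Int × Int)) (bd dir : Int) (h : ∀ p ∈ l, ¬ p.2 < bd) :
    l.foldl mstep (bd, dir) = (bd, dir) := by
  induction l with
  | nil => rfl
  | cons hd tl ih =>
      simp only [List.foldl_cons, mstep, if_neg (h hd (by simp))]
      exact ih (fun p hp => h p (by simp [hp]))

lemma foldmin (l : List (Int × Int)) (bd0 dir0 s ns : Int)
    (hmem : (s, ns) ∈ l)
    (hs : ∀ p ∈ l, p.1 = s → p.2 = ns)
    (hmin : ∀ p ∈ l, p.1 ≠ s → ns < p.2) :
    l.foldl mstep (bd0, dir0) = if ns < bd0 then (ns, s) else (bd0, dir0) := by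
  induction l generalizing bd0 dir0 with
  | nil => exact absurd hmem (by simp)
  | cons hd tl ih =>
      by_cases hhd : hd.1 = s
      · have hv : hd.2 = ns := hs hd (by simp) hhd
        by_cases hlt : ns < bd0
        · have hno : ∀ p ∈ tl, ¬ p.2 < ns := by
            intro p hp
            by_cases hp1 : p.1 = s
            · rw [hs p (by simp [hp]) hp1]; omega
            · have := hmin p (by simp [hp]) hp1; omega
          simp only [List.foldl_cons, mstep, hv, if_pos hlt, hhd]
          rw [foldmin_no tl ns s hno]
        · have hno : ∀ p ∈ tl, ¬ p.2 < bd0 := by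
            intro p hp
            by_cases hp1 : p.1 = s
            · rw [hs p (by simp [hp]) hp1]; omega
            · have := hmin p (by simp [hp]) hp1; omega
          simp only [List.foldl_cons, mstep, hv, if_neg hlt]
          rw [foldmin_no tl bd0 dir0 hno]
      · have hv : ns < hd.2 := hmin hd (by simp) hhd
        have hmem' : (s, ns) ∈ tl := by
          rcases List.mem_cons.mp hmem with h | h
          · exact absurd (congrArg Prod.fst h.symm) hhd
          · exact h
        have hs' : ∀ p ∈ tl, p.1 = s → p.2 = ns := fun p hp => hs p (by simp [hp])
        have hmin' : ∀ p ∈ tl, p.1 ≠ s → ns < p.2 := fun p hp => hmin p (by simp [hp])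
        by_cases hlt : hd.2 < bd0
        · simp only [List.foldl_cons, mstep, if_pos hlt]
          rw [ih hd.2 hd.1 hmem' hs' hmin', if_pos hv, if_pos (by omega)]
        · simp only [List.foldl_cons, mstep, if_neg hlt]
          rw [ih bd0 dir0 hmem' hs' hmin']

-- per-coordinate optimality of the sign step
lemma coordmin (x s a : Int)
    (hs : (0 < x ∧ s = 1) ∨ (x < 0 ∧ s = -1) ∨ (x = 0 ∧ s = 0))
    (ha : a = -1 ∨ a = 0 ∨ a = 1) :
    (s - x) ^ 2 ≤ (a - x) ^ 2 ∧ (a ≠ s → (s - x) ^ 2 < (a - x) ^ 2) := by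
  rcases hs with ⟨h, rfl⟩ | ⟨h, rfl⟩ | ⟨h, rfl⟩ <;>
    rcases ha with rfl | rfl | rfl <;>
    refine ⟨by nlinarith, fun hne => ?_⟩ <;> first
      | exact absurd rfl hne
      | nlinarith

lemma ndmin (r0 r1 tr tc sr sc a b : Int)
    (hr : (r0 < tr ∧ sr = 1) ∨ (tr < r0 ∧ sr = -1) ∨ (tr = r0 ∧ sr = 0))
    (hc : (r1 < tc ∧ sc = 1) ∨ (tc < r1 ∧ sc = -1) ∨ (tc = r1 ∧ sc = 0))
    (ha : a = -1 ∨ a = 0 ∨ a = 1) (hb : b = -1 ∨ b = 0 ∨ b = 1)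
    (hne : ¬(a = sr ∧ b = sc)) :
    (r0 + sr - tr) ^ 2 + (r1 + sc - tc) ^ 2 < (r0 + a - tr) ^ 2 + (r1 + b - tc) ^ 2 := by
  have h1 := coordmin (tr - r0) sr a (by rcases hr with ⟨h, rfl⟩ | ⟨h, rfl⟩ | ⟨h, rfl⟩ <;> simp <;> omega) ha
  have h2 := coordmin (tc - r1) sc b (by rcases hc with ⟨h, rfl⟩ | ⟨h, rfl⟩ | ⟨h, rfl⟩ <;> simp <;> omega) hb
  have e1 : r0 + sr - tr = sr - (tr - r0) := by ring
  have e2 : r0 + a - tr = a - (tr - r0) := by ring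
  have e3 : r1 + sc - tc = sc - (tc - r1) := by ring
  have e4 : r1 + b - tc = b - (tc - r1) := by ring
  rw [e1, e2, e3, e4]
  by_cases hab : a = sr
  · have hbne : b ≠ sc := fun hbc => hne ⟨hab, hbc⟩
    have := h2.2 hbne
    have := h1.1
    omega
  · have := h1.2 hab
    have := h2.1
    omega

-- named pieces of the two ports (definitionally equal to their bodies)
def fold1 (santas : List (List Int)) (rudolf : List Int) : Int × Int :=
  (PySem.List.pyRange 0 (santas.length : Int) 1).foldl (stepA santas rudolf) (0, 999)

def phase2 (santas : List (List Int)) (rudolf : List Int) (cs cd : Int) : Int :=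
  ((PySem.List.pyRange 0 8 1).foldl (fun (b : List Int × Int × Int) i =>
      let nrow := PySem.List.pyGetD rudolf 0 0 + PySem.List.pyGetD (PySem.List.pyGetD directions i []) 0 0
      let ncol := PySem.List.pyGetD rudolf 1 0 + PySem.List.pyGetD (PySem.List.pyGetD directions i []) 1 0
      if get_dist [nrow, ncol] (PySem.List.pyGetD santas cs []) < b.2.1 then
        ([nrow, ncol], get_dist [nrow, ncol] (PySem.List.pyGetD santas cs []), i)
      else b) (([0, 0] : List Int), cd, (-1 : Int))).2.2

def phaseB (rudolf : List Int) (cd tr tc : Int) : Int :=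
  let r0 := PySem.List.pyGetD rudolf 0 0
  let r1 := PySem.List.pyGetD rudolf 1 0
  let dr := (if r0 < tr then (1 : Int) else 0) - (if tr < r0 then (1 : Int) else 0)
  let dc := (if r1 < tc then (1 : Int) else 0) - (if tc < r1 then (1 : Int) else 0)
  if dr = 0 ∧ dc = 0 then -1
  else if get_dist [r0 + dr, r1 + dc] [tr, tc] < cd then
    match PySem.List.index? directions [dr, dc] with
    | some k => (k : Int)
    | none => -1
  else -1

def ndf (r0 r1 tr tc a b : Int) : Int := (r0 + a - tr) ^ 2 + (r1 + b - tc) ^ 2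

def sIdx (sr sc : Int) : Int :=
  match PySem.List.index? directions [sr, sc] with
  | some k => (k : Int)
  | none => -1

def dirL (r0 r1 tr tc : Int) : List (Int × Int) :=
  [(0, ndf r0 r1 tr tc (-1) 0), (1, ndf r0 r1 tr tc (-1) 1), (2, ndf r0 r1 tr tc 0 1),
   (3, ndf r0 r1 tr tc 1 1), (4, ndf r0 r1 tr tc 1 0), (5, ndf r0 r1 tr tc 1 (-1)),
   (6, ndf r0 r1 tr tc 0 (-1)), (7, ndf r0 r1 tr tc (-1) (-1))]

-- projection: drop the best_pos component of A's second-loop state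
lemma projA (tgt rudolf : List Int) (l : List Int) :
    ∀ (pos : List Int) (bd dir : Int),
    (l.foldl (fun (b : List Int × Int × Int) i =>
      let nrow := PySem.List.pyGetD rudolf 0 0 + PySem.List.pyGetD (PySem.List.pyGetD directions i []) 0 0
      let ncol := PySem.List.pyGetD rudolf 1 0 + PySem.List.pyGetD (PySem.List.pyGetD directions i []) 1 0
      if get_dist [nrow, ncol] tgt < b.2.1 then
        ([nrow, ncol], get_dist [nrow, ncol] tgt, i)
      else b) (pos, bd, dir)).2 =
    l.foldl (fun (st : Int × Int) i =>
      mstep st (i, get_dist [PySem.List.pyGetD rudolf 0 0 + PySem.List.pyGetD (PySem.List.pyGetD directions i []) 0 0,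
                  PySem.List.pyGetD rudolf 1 0 + PySem.List.pyGetD (PySem.List.pyGetD directions i []) 1 0] tgt)) (bd, dir) := by
  induction l with
  | nil => intro pos bd dir; rfl
  | cons hd tl ih =>
      intro pos bd dir
      simp only [List.foldl_cons, mstep]
      by_cases h : get_dist [PySem.List.pyGetD rudolf 0 0 + PySem.List.pyGetD (PySem.List.pyGetD directions hd []) 0 0,
          PySem.List.pyGetD rudolf 1 0 + PySem.List.pyGetD (PySem.List.pyGetD directions hd []) 1 0] tgt < bd
      · simp only [if_pos h]; exact ih _ _ _
      · simp only [if_neg h]; exact ih _ _ _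

lemma fold8 (r0 r1 tr tc cd sr sc : Int)
    (hr : (r0 < tr ∧ sr = 1) ∨ (tr < r0 ∧ sr = -1) ∨ (tr = r0 ∧ sr = 0))
    (hc : (r1 < tc ∧ sc = 1) ∨ (tc < r1 ∧ sc = -1) ∨ (tc = r1 ∧ sc = 0))
    (hne : ¬(sr = 0 ∧ sc = 0)) :
    ((dirL r0 r1 tr tc).foldl mstep (cd, -1)).2 =
      if ndf r0 r1 tr tc sr sc < cd then sIdx sr sc else -1 := by
  rcases hr with ⟨h1, rfl⟩ | ⟨h1, rfl⟩ | ⟨h1, rfl⟩ <;>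
    rcases hc with ⟨h2, rfl⟩ | ⟨h2, rfl⟩ | ⟨h2, rfl⟩
  · have hmem : ((3:Int), ndf r0 r1 tr tc 1 1) ∈ dirL r0 r1 tr tc := by simp [dirL]
    have hs : ∀ p ∈ dirL r0 r1 tr tc, p.1 = 3 → p.2 = ndf r0 r1 tr tc 1 1 := by
      intro p hp h
      simp only [dirL, List.mem_cons, List.not_mem_nil, or_false] at hp
      rcases hp with rfl|rfl|rfl|rfl|rfl|rfl|rfl|rfl <;> first | rfl | simp at h
    have hmin : ∀ p ∈ dirL r0 r1 tr tc, p.1 ≠ 3 → ndf r0 r1 tr tc 1 1 < p.2 := by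
      intro p hp h
      simp only [dirL, List.mem_cons, List.not_mem_nil, or_false] at hp
      rcases hp with rfl|rfl|rfl|rfl|rfl|rfl|rfl|rfl <;>
        first
          | exact absurd rfl h
          | exact ndmin r0 r1 tr tc 1 1 _ _ (Or.inl ⟨h1, rfl⟩) (Or.inl ⟨h2, rfl⟩) (by norm_num) (by norm_num) (by decide)
    rw [foldmin _ cd (-1) _ _ hmem hs hmin]
    by_cases h : ndf r0 r1 tr tc 1 1 < cd
    · rw [if_pos h, if_pos h]; rfl
    · rw [if_neg h, if_neg h]
  · have hmem : ((5:Int), ndf r0 r1 tr tc 1 (-1)) ∈ dirL r0 r1 tr tc := by simp [dirL]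
    have hs : ∀ p ∈ dirL r0 r1 tr tc, p.1 = 5 → p.2 = ndf r0 r1 tr tc 1 (-1) := by
      intro p hp h
      simp only [dirL, List.mem_cons, List.not_mem_nil, or_false] at hp
      rcases hp with rfl|rfl|rfl|rfl|rfl|rfl|rfl|rfl <;> first | rfl | simp at h
    have hmin : ∀ p ∈ dirL r0 r1 tr tc, p.1 ≠ 5 → ndf r0 r1 tr tc 1 (-1) < p.2 := by
      intro p hp h
      simp only [dirL, List.mem_cons, List.not_mem_nil, or_false] at hp
      rcases hp with rfl|rfl|rfl|rfl|rfl|rfl|rfl|rfl <;>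
        first
          | exact absurd rfl h
          | exact ndmin r0 r1 tr tc 1 (-1) _ _ (Or.inl ⟨h1, rfl⟩) (Or.inr (Or.inl ⟨h2, rfl⟩)) (by norm_num) (by norm_num) (by decide)
    rw [foldmin _ cd (-1) _ _ hmem hs hmin]
    by_cases h : ndf r0 r1 tr tc 1 (-1) < cd
    · rw [if_pos h, if_pos h]; rfl
    · rw [if_neg h, if_neg h]
  · have hmem : ((4:Int), ndf r0 r1 tr tc 1 0) ∈ dirL r0 r1 tr tc := by simp [dirL]
    have hs : ∀ p ∈ dirL r0 r1 tr tc, p.1 = 4 → p.2 = ndf r0 r1 tr tc 1 0 := by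
      intro p hp h
      simp only [dirL, List.mem_cons, List.not_mem_nil, or_false] at hp
      rcases hp with rfl|rfl|rfl|rfl|rfl|rfl|rfl|rfl <;> first | rfl | simp at h
    have hmin : ∀ p ∈ dirL r0 r1 tr tc, p.1 ≠ 4 → ndf r0 r1 tr tc 1 0 < p.2 := by
      intro p hp h
      simp only [dirL, List.mem_cons, List.not_mem_nil, or_false] at hp
      rcases hp with rfl|rfl|rfl|rfl|rfl|rfl|rfl|rfl <;>
        first
          | exact absurd rfl h
          | exact ndmin r0 r1 tr tc 1 0 _ _ (Or.inl ⟨h1, rfl⟩) (Or.inr (Or.inr ⟨h2, rfl⟩)) (by norm_num) (by norm_num) (by decide)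
    rw [foldmin _ cd (-1) _ _ hmem hs hmin]
    by_cases h : ndf r0 r1 tr tc 1 0 < cd
    · rw [if_pos h, if_pos h]; rfl
    · rw [if_neg h, if_neg h]
  · have hmem : ((1:Int), ndf r0 r1 tr tc (-1) 1) ∈ dirL r0 r1 tr tc := by simp [dirL]
    have hs : ∀ p ∈ dirL r0 r1 tr tc, p.1 = 1 → p.2 = ndf r0 r1 tr tc (-1) 1 := by
      intro p hp h
      simp only [dirL, List.mem_cons, List.not_mem_nil, or_false] at hp
      rcases hp with rfl|rfl|rfl|rfl|rfl|rfl|rfl|rfl <;> first | rfl | simp at h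
    have hmin : ∀ p ∈ dirL r0 r1 tr tc, p.1 ≠ 1 → ndf r0 r1 tr tc (-1) 1 < p.2 := by
      intro p hp h
      simp only [dirL, List.mem_cons, List.not_mem_nil, or_false] at hp
      rcases hp with rfl|rfl|rfl|rfl|rfl|rfl|rfl|rfl <;>
        first
          | exact absurd rfl h
          | exact ndmin r0 r1 tr tc (-1) 1 _ _ (Or.inr (Or.inl ⟨h1, rfl⟩)) (Or.inl ⟨h2, rfl⟩) (by norm_num) (by norm_num) (by decide)
    rw [foldmin _ cd (-1) _ _ hmem hs hmin]
    by_cases h : ndf r0 r1 tr tc (-1) 1 < cd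
    · rw [if_pos h, if_pos h]; rfl
    · rw [if_neg h, if_neg h]
  · have hmem : ((7:Int), ndf r0 r1 tr tc (-1) (-1)) ∈ dirL r0 r1 tr tc := by simp [dirL]
    have hs : ∀ p ∈ dirL r0 r1 tr tc, p.1 = 7 → p.2 = ndf r0 r1 tr tc (-1) (-1) := by
      intro p hp h
      simp only [dirL, List.mem_cons, List.not_mem_nil, or_false] at hp
      rcases hp with rfl|rfl|rfl|rfl|rfl|rfl|rfl|rfl <;> first | rfl | simp at h
    have hmin : ∀ p ∈ dirL r0 r1 tr tc, p.1 ≠ 7 → ndf r0 r1 tr tc (-1) (-1) < p.2 := by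
      intro p hp h
      simp only [dirL, List.mem_cons, List.not_mem_nil, or_false] at hp
      rcases hp with rfl|rfl|rfl|rfl|rfl|rfl|rfl|rfl <;>
        first
          | exact absurd rfl h
          | exact ndmin r0 r1 tr tc (-1) (-1) _ _ (Or.inr (Or.inl ⟨h1, rfl⟩)) (Or.inr (Or.inl ⟨h2, rfl⟩)) (by norm_num) (by norm_num) (by decide)
    rw [foldmin _ cd (-1) _ _ hmem hs hmin]
    by_cases h : ndf r0 r1 tr tc (-1) (-1) < cd
    · rw [if_pos h, if_pos h]; rfl
    · rw [if_neg h, if_neg h]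
  · have hmem : ((0:Int), ndf r0 r1 tr tc (-1) 0) ∈ dirL r0 r1 tr tc := by simp [dirL]
    have hs : ∀ p ∈ dirL r0 r1 tr tc, p.1 = 0 → p.2 = ndf r0 r1 tr tc (-1) 0 := by
      intro p hp h
      simp only [dirL, List.mem_cons, List.not_mem_nil, or_false] at hp
      rcases hp with rfl|rfl|rfl|rfl|rfl|rfl|rfl|rfl <;> first | rfl | simp at h
    have hmin : ∀ p ∈ dirL r0 r1 tr tc, p.1 ≠ 0 → ndf r0 r1 tr tc (-1) 0 < p.2 := by
      intro p hp h
      simp only [dirL, List.mem_cons, List.not_mem_nil, or_false] at hp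
      rcases hp with rfl|rfl|rfl|rfl|rfl|rfl|rfl|rfl <;>
        first
          | exact absurd rfl h
          | exact ndmin r0 r1 tr tc (-1) 0 _ _ (Or.inr (Or.inl ⟨h1, rfl⟩)) (Or.inr (Or.inr ⟨h2, rfl⟩)) (by norm_num) (by norm_num) (by decide)
    rw [foldmin _ cd (-1) _ _ hmem hs hmin]
    by_cases h : ndf r0 r1 tr tc (-1) 0 < cd
    · rw [if_pos h, if_pos h]; rfl
    · rw [if_neg h, if_neg h]
  · have hmem : ((2:Int), ndf r0 r1 tr tc 0 1) ∈ dirL r0 r1 tr tc := by simp [dirL]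
    have hs : ∀ p ∈ dirL r0 r1 tr tc, p.1 = 2 → p.2 = ndf r0 r1 tr tc 0 1 := by
      intro p hp h
      simp only [dirL, List.mem_cons, List.not_mem_nil, or_false] at hp
      rcases hp with rfl|rfl|rfl|rfl|rfl|rfl|rfl|rfl <;> first | rfl | simp at h
    have hmin : ∀ p ∈ dirL r0 r1 tr tc, p.1 ≠ 2 → ndf r0 r1 tr tc 0 1 < p.2 := by
      intro p hp h
      simp only [dirL, List.mem_cons, List.not_mem_nil, or_false] at hp
      rcases hp with rfl|rfl|rfl|rfl|rfl|rfl|rfl|rfl <;>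
        first
          | exact absurd rfl h
          | exact ndmin r0 r1 tr tc 0 1 _ _ (Or.inr (Or.inr ⟨h1, rfl⟩)) (Or.inl ⟨h2, rfl⟩) (by norm_num) (by norm_num) (by decide)
    rw [foldmin _ cd (-1) _ _ hmem hs hmin]
    by_cases h : ndf r0 r1 tr tc 0 1 < cd
    · rw [if_pos h, if_pos h]; rfl
    · rw [if_neg h, if_neg h]
  · have hmem : ((6:Int), ndf r0 r1 tr tc 0 (-1)) ∈ dirL r0 r1 tr tc := by simp [dirL]
    have hs : ∀ p ∈ dirL r0 r1 tr tc, p.1 = 6 → p.2 = ndf r0 r1 tr tc 0 (-1) := by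
      intro p hp h
      simp only [dirL, List.mem_cons, List.not_mem_nil, or_false] at hp
      rcases hp with rfl|rfl|rfl|rfl|rfl|rfl|rfl|rfl <;> first | rfl | simp at h
    have hmin : ∀ p ∈ dirL r0 r1 tr tc, p.1 ≠ 6 → ndf r0 r1 tr tc 0 (-1) < p.2 := by
      intro p hp h
      simp only [dirL, List.mem_cons, List.not_mem_nil, or_false] at hp
      rcases hp with rfl|rfl|rfl|rfl|rfl|rfl|rfl|rfl <;>
        first
          | exact absurd rfl h
          | exact ndmin r0 r1 tr tc 0 (-1) _ _ (Or.inr (Or.inr ⟨h1, rfl⟩)) (Or.inr (Or.inl ⟨h2, rfl⟩)) (by norm_num) (by norm_num) (by decide)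
    rw [foldmin _ cd (-1) _ _ hmem hs hmin]
    by_cases h : ndf r0 r1 tr tc 0 (-1) < cd
    · rw [if_pos h, if_pos h]; rfl
    · rw [if_neg h, if_neg h]
  · exact absurd ⟨rfl, rfl⟩ hne

lemma fold8zero (r0 r1 tr tc cd : Int) (h1 : tr = r0) (h2 : tc = r1) (hcd : cd ≤ 0) :
    ((dirL r0 r1 tr tc).foldl mstep (cd, -1)).2 = -1 := by
  rw [foldmin_no]
  intro p hp
  subst h1 h2
  simp only [dirL, List.mem_cons, List.not_mem_nil, or_false] at hp
  rcases hp with rfl|rfl|rfl|rfl|rfl|rfl|rfl|rfl <;> simp [ndf] <;> nlinarith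

-- second loop characterisation
lemma secondloop (santas : List (List Int)) (rudolf : List Int) (cs cd tr tc : Int)
    (htr : PySem.List.pyGetD (PySem.List.pyGetD santas cs []) 0 0 = tr)
    (htc : PySem.List.pyGetD (PySem.List.pyGetD santas cs []) 1 0 = tc)
    (hcap : (tr = PySem.List.pyGetD rudolf 0 0 ∧ tc = PySem.List.pyGetD rudolf 1 0) → cd = 0) :
    phase2 santas rudolf cs cd =
    phaseB rudolf cd tr tc := by
  subst htr htc
  unfold phase2 phaseB
  rw [projA]
  show ((dirL (PySem.List.pyGetD rudolf 0 0) (PySem.List.pyGetD rudolf 1 0)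
      (PySem.List.pyGetD (PySem.List.pyGetD santas cs []) 0 0)
      (PySem.List.pyGetD (PySem.List.pyGetD santas cs []) 1 0)).foldl mstep (cd, -1)).2 = _
  set r0 := PySem.List.pyGetD rudolf 0 0 with hr0
  set r1 := PySem.List.pyGetD rudolf 1 0 with hr1
  set T0 := PySem.List.pyGetD (PySem.List.pyGetD santas cs []) 0 0 with hT0
  set T1 := PySem.List.pyGetD (PySem.List.pyGetD santas cs []) 1 0 with hT1
  show ((dirL r0 r1 T0 T1).foldl mstep (cd, -1)).2 =
    (let dr := (if r0 < T0 then (1 : Int) else 0) - (if T0 < r0 then (1 : Int) else 0)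
     let dc := (if r1 < T1 then (1 : Int) else 0) - (if T1 < r1 then (1 : Int) else 0)
     if dr = 0 ∧ dc = 0 then -1
     else if ndf r0 r1 T0 T1 dr dc < cd then sIdx dr dc
     else -1)
  rcases Int.lt_trichotomy r0 T0 with h1 | h1 | h1 <;>
    rcases Int.lt_trichotomy r1 T1 with h2 | h2 | h2
  · have hdr : (if r0 < T0 then (1 : Int) else 0) - (if T0 < r0 then (1 : Int) else 0) = 1 := by rw [if_pos h1, if_neg (by omega)]; norm_num
    have hdc : (if r1 < T1 then (1 : Int) else 0) - (if T1 < r1 then (1 : Int) else 0) = 1 := by rw [if_pos h2, if_neg (by omega)]; norm_num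
    simp only [hdr, hdc]
    rw [if_neg (by decide)]
    exact fold8 r0 r1 T0 T1 cd 1 1 (Or.inl ⟨h1, rfl⟩) (Or.inl ⟨h2, rfl⟩) (by decide)
  · have hdr : (if r0 < T0 then (1 : Int) else 0) - (if T0 < r0 then (1 : Int) else 0) = 1 := by rw [if_pos h1, if_neg (by omega)]; norm_num
    have hdc : (if r1 < T1 then (1 : Int) else 0) - (if T1 < r1 then (1 : Int) else 0) = 0 := by rw [if_neg (by omega), if_neg (by omega)]; norm_num
    simp only [hdr, hdc]
    rw [if_neg (by decide)]
    exact fold8 r0 r1 T0 T1 cd 1 0 (Or.inl ⟨h1, rfl⟩) (Or.inr (Or.inr ⟨h2.symm, rfl⟩)) (by decide)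
  · have hdr : (if r0 < T0 then (1 : Int) else 0) - (if T0 < r0 then (1 : Int) else 0) = 1 := by rw [if_pos h1, if_neg (by omega)]; norm_num
    have hdc : (if r1 < T1 then (1 : Int) else 0) - (if T1 < r1 then (1 : Int) else 0) = (-1) := by rw [if_neg (by omega), if_pos h2]; norm_num
    simp only [hdr, hdc]
    rw [if_neg (by decide)]
    exact fold8 r0 r1 T0 T1 cd 1 (-1) (Or.inl ⟨h1, rfl⟩) (Or.inr (Or.inl ⟨h2, rfl⟩)) (by decide)
  · have hdr : (if r0 < T0 then (1 : Int) else 0) - (if T0 < r0 then (1 : Int) else 0) = 0 := by rw [if_neg (by omega), if_neg (by omega)]; norm_num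
    have hdc : (if r1 < T1 then (1 : Int) else 0) - (if T1 < r1 then (1 : Int) else 0) = 1 := by rw [if_pos h2, if_neg (by omega)]; norm_num
    simp only [hdr, hdc]
    rw [if_neg (by decide)]
    exact fold8 r0 r1 T0 T1 cd 0 1 (Or.inr (Or.inr ⟨h1.symm, rfl⟩)) (Or.inl ⟨h2, rfl⟩) (by decide)
  · -- coincident target: cap is 0, both sides return -1
    have hcd : cd = 0 := hcap ⟨h1.symm, h2.symm⟩
    subst hcd
    rw [fold8zero r0 r1 T0 T1 0 h1.symm h2.symm le_rfl]
    simp only [h1, h2]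
    norm_num
  · have hdr : (if r0 < T0 then (1 : Int) else 0) - (if T0 < r0 then (1 : Int) else 0) = 0 := by rw [if_neg (by omega), if_neg (by omega)]; norm_num
    have hdc : (if r1 < T1 then (1 : Int) else 0) - (if T1 < r1 then (1 : Int) else 0) = (-1) := by rw [if_neg (by omega), if_pos h2]; norm_num
    simp only [hdr, hdc]
    rw [if_neg (by decide)]
    exact fold8 r0 r1 T0 T1 cd 0 (-1) (Or.inr (Or.inr ⟨h1.symm, rfl⟩)) (Or.inr (Or.inl ⟨h2, rfl⟩)) (by decide)
  · have hdr : (if r0 < T0 then (1 : Int) else 0) - (if T0 < r0 then (1 : Int) else 0) = (-1) := by rw [if_neg (by omega), if_pos h1]; norm_num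
    have hdc : (if r1 < T1 then (1 : Int) else 0) - (if T1 < r1 then (1 : Int) else 0) = 1 := by rw [if_pos h2, if_neg (by omega)]; norm_num
    simp only [hdr, hdc]
    rw [if_neg (by decide)]
    exact fold8 r0 r1 T0 T1 cd (-1) 1 (Or.inr (Or.inl ⟨h1, rfl⟩)) (Or.inl ⟨h2, rfl⟩) (by decide)
  · have hdr : (if r0 < T0 then (1 : Int) else 0) - (if T0 < r0 then (1 : Int) else 0) = (-1) := by rw [if_neg (by omega), if_pos h1]; norm_num
    have hdc : (if r1 < T1 then (1 : Int) else 0) - (if T1 < r1 then (1 : Int) else 0) = 0 := by rw [if_neg (by omega), if_neg (by omega)]; norm_num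
    simp only [hdr, hdc]
    rw [if_neg (by decide)]
    exact fold8 r0 r1 T0 T1 cd (-1) 0 (Or.inr (Or.inl ⟨h1, rfl⟩)) (Or.inr (Or.inr ⟨h2.symm, rfl⟩)) (by decide)
  · have hdr : (if r0 < T0 then (1 : Int) else 0) - (if T0 < r0 then (1 : Int) else 0) = (-1) := by rw [if_neg (by omega), if_pos h1]; norm_num
    have hdc : (if r1 < T1 then (1 : Int) else 0) - (if T1 < r1 then (1 : Int) else 0) = (-1) := by rw [if_neg (by omega), if_pos h2]; norm_num
    simp only [hdr, hdc]
    rw [if_neg (by decide)]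
    exact fold8 r0 r1 T0 T1 cd (-1) (-1) (Or.inr (Or.inl ⟨h1, rfl⟩)) (Or.inr (Or.inl ⟨h2, rfl⟩)) (by decide)

-- B's tail (as the port writes it) equals phaseB
lemma tailB_eq_phaseB (rudolf : List Int) (cd tr tc : Int) :
    (let r0 := PySem.List.pyGetD rudolf 0 0
     let r1 := PySem.List.pyGetD rudolf 1 0
     let dr := (if tr > r0 then (1 : Int) else 0) - (if tr < r0 then (1 : Int) else 0)
     let dc := (if tc > r1 then (1 : Int) else 0) - (if tc < r1 then (1 : Int) else 0)
     if dr = 0 ∧ dc = 0 then -1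
     else if get_dist [r0 + dr, r1 + dc] [tr, tc] ≥ cd then -1
     else match PySem.List.index? directions [dr, dc] with
          | some k => (k : Int)
          | none => -1) = phaseB rudolf cd tr tc := by
  unfold phaseB
  simp only [gt_iff_lt, ge_iff_le]
  set r0 := PySem.List.pyGetD rudolf 0 0
  set r1 := PySem.List.pyGetD rudolf 1 0
  set dr := (if r0 < tr then (1 : Int) else 0) - (if tr < r0 then (1 : Int) else 0)
  set dc := (if r1 < tc then (1 : Int) else 0) - (if tc < r1 then (1 : Int) else 0)
  by_cases h0 : dr = 0 ∧ dc = 0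
  · rw [if_pos h0, if_pos h0]
  · rw [if_neg h0, if_neg h0]
    by_cases h1 : get_dist [r0 + dr, r1 + dc] [tr, tc] < cd
    · rw [if_neg (by omega), if_pos h1]
    · rw [if_pos (by omega), if_neg h1]

-- ===== VERDICT (by name: the statement is the Claim_ definition above) =====
theorem rudolf_move_spec : Claim_equal_rudolf_move := by
  intro santas rudolf _ hpre
  obtain ⟨hne, _, _⟩ := hpre
  show rudolf_move santas rudolf = rudolf_move_alt santas rudolf
  have hA : rudolf_move santas rudolf =
      phase2 santas rudolf (fold1 santas rudolf).1 (fold1 santas rudolf).2 := rfl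
  have hB : rudolf_move_alt santas rudolf =
      phaseB rudolf (fold1 santas rudolf).2
        (PySem.List.pyGetD (PySem.List.pyGetD santas (fold1 santas rudolf).1 []) 0 0)
        (PySem.List.pyGetD (PySem.List.pyGetD santas (fold1 santas rudolf).1 []) 1 0) := by
    unfold rudolf_move_alt
    rw [stepB_eq_stepA]
    exact tailB_eq_phaseB rudolf _ _ _
  rw [hA, hB]
  set cs := (fold1 santas rudolf).1 with hcs
  set cd := (fold1 santas rudolf).2 with hcd
  apply secondloop santas rudolf cs cd _ _ rfl rfl
  rintro ⟨hc1, hc2⟩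
  -- the chosen target coincides with rudolf: its distance is 0, so cur_dist is 0
  have hd0 : distOf santas rudolf cs = 0 := by
    unfold distOf
    rw [get_dist_sumsq, hc1, hc2]
    ring
  have hQ : QInv santas rudolf (fold1 santas rudolf) :=
    fold_Q santas rudolf _ _ (Or.inl rfl)
  rcases hQ with hq | hq
  · -- state stayed (0, 999): impossible, index 0 was scanned and its distance is 0
    have hc0 : cs = 0 := congrArg Prod.fst hq
    have h0mem : (0 : Int) ∈ PySem.List.pyRange 0 (santas.length : Int) 1 := by
      rw [PySem.List.mem_pyRange_one]
      have : santas.length ≠ 0 := fun h => hne (List.eq_nil_of_length_eq_zero h)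
      omega
    have hle := fold_le_mem santas rudolf _ ((0 : Int), (999 : Int)) 0 h0mem
    rw [hc0] at hd0
    rw [hd0] at hle
    have hle2 : cd ≤ 0 := by rw [hcd]; exact hle
    have h999 : cd = 999 := congrArg Prod.snd hq
    omega
  · rw [← hcd, ← hcs] at hq
    rw [hq, hd0]
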